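-- pv_equiv track=rewrite | github.com/RezaKakooee/space_layout_gym | gym-floorplan/gym_floorplan/envs/observation/design_inspector.py | _get_edge_color_data_dict
-- ===== SOURCE A (Python) =====
-- def _get_edge_color_data_dict(desired, achieved, sort=True):
--     edges = desired + achieved
--     edge_color_data_dict = {'green': [], 'blue': [], 'red': []}
--     for ed in edges:
--         if (ed in desired) and (ed in achieved):
--             if ed not in edge_color_data_dict['green']:
--                 edge_color_data_dict['green'].append(ed)
--         elif (ed in desired) and (ed not in achieved):
--             if ed not in edge_color_data_dict['red']:
--                 edge_color_data_dict['red'].append(ed)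
--         elif (ed not in desired) and (ed in achieved):
--             if ed not in edge_color_data_dict['blue']:
--                 edge_color_data_dict['blue'].append(ed)
--     if sort:
--         edge_color_data_dict['green'].sort()
--         edge_color_data_dict['red'].sort()
--         edge_color_data_dict['blue'].sort()
--     return edge_color_data_dict
-- ===== SOURCE B (Python) =====
-- def _get_edge_color_data_dict(desired, achieved, sort=True):
--     dset = set(desired)
--     aset = set(achieved)
--     uniq_desired = list(dict.fromkeys(desired))
--     uniq_achieved = list(dict.fromkeys(achieved))
--     green = [ed for ed in uniq_desired if ed in aset]
--     red = [ed for ed in uniq_desired if ed not in aset]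
--     blue = [ed for ed in uniq_achieved if ed not in dset]
--     if sort:
--         green.sort()
--         red.sort()
--         blue.sort()
--     return {'green': green, 'blue': blue, 'red': red}
-- ===== Notes on version B (the rewrite author's own statement) =====
-- stated objective: faster
-- what changed: Instead of A's single classifying loop that dedups by scanning each output list, B deduplicates each input once via dict.fromkeys and then partitions the unique elements with comprehensions over precomputed hash sets, eliminating all inner list scans.
import Mathlib
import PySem

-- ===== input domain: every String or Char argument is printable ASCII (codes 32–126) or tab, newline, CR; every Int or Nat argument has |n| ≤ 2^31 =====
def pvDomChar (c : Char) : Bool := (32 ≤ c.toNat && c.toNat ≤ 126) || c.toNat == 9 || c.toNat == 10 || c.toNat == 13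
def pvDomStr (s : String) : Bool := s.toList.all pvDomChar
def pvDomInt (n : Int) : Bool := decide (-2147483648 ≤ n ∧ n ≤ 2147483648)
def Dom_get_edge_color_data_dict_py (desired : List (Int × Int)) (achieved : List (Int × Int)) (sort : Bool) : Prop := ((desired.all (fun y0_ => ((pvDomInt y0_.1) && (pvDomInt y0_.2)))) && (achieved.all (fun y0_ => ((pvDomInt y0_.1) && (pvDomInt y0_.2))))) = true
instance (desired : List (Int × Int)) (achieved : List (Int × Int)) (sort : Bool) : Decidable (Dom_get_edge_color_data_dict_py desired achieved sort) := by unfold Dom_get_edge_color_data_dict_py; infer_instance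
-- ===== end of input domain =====

-- B replaces A's single classifying loop (which dedups by scanning each output list) by a
-- dedup-then-partition scheme: dict.fromkeys dedups each input once, comprehensions over
-- precomputed sets split the unique elements into green/red/blue; objective: faster.

-- ===== PORT A =====
-- state is (green, blue, red); one step of A's loop over edges = desired ++ achieved
def stepA (desired achieved : List (Int × Int))
    (st : List (Int × Int) × List (Int × Int) × List (Int × Int)) (ed : Int × Int) :
    List (Int × Int) × List (Int × Int) × List (Int × Int) :=
  if ed ∈ desired ∧ ed ∈ achieved then
    if ed ∈ st.1 then st else (st.1 ++ [ed], st.2.1, st.2.2)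
  else if ed ∈ desired ∧ ed ∉ achieved then
    if ed ∈ st.2.2 then st else (st.1, st.2.1, st.2.2 ++ [ed])
  else if ed ∉ desired ∧ ed ∈ achieved then
    if ed ∈ st.2.1 then st else (st.1, st.2.1 ++ [ed], st.2.2)
  else st

def get_edge_color_data_dict_py (desired : List (Int × Int)) (achieved : List (Int × Int)) (sort : Bool) : List (String × List (Int × Int)) :=
  let edges := desired ++ achieved
  let st := edges.foldl (stepA desired achieved) ([], [], [])
  if sort then
    [("green", PySem.List.sorted2 st.1 (fun p => p.1) (fun p => p.2)),
     ("blue", PySem.List.sorted2 st.2.1 (fun p => p.1) (fun p => p.2)),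
     ("red", PySem.List.sorted2 st.2.2 (fun p => p.1) (fun p => p.2))]
  else
    [("green", st.1), ("blue", st.2.1), ("red", st.2.2)]

-- ===== PORT B =====
-- set(desired)/set(achieved) → PySem.Set.ofList; list(dict.fromkeys(..)) → PySem.List.dedup;
-- the three comprehensions are filters over the deduplicated lists.
def get_edge_color_data_dict_py_alt (desired : List (Int × Int)) (achieved : List (Int × Int)) (sort : Bool) : List (String × List (Int × Int)) :=
  let dset := PySem.Set.ofList desired
  let aset := PySem.Set.ofList achieved
  let uniq_desired := PySem.List.dedup desired
  let uniq_achieved := PySem.List.dedup achieved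
  let green := uniq_desired.filter (fun ed => PySem.Set.contains aset ed)
  let red := uniq_desired.filter (fun ed => ! PySem.Set.contains aset ed)
  let blue := uniq_achieved.filter (fun ed => ! PySem.Set.contains dset ed)
  if sort then
    [("green", PySem.List.sorted2 green (fun p => p.1) (fun p => p.2)),
     ("blue", PySem.List.sorted2 blue (fun p => p.1) (fun p => p.2)),
     ("red", PySem.List.sorted2 red (fun p => p.1) (fun p => p.2))]
  else
    [("green", green), ("blue", blue), ("red", red)]

-- ===== PRECONDITION & SPEC =====
def Spec_get_edge_color_data_dict_py (desired : List (Int × Int)) (achieved : List (Int × Int)) (sort : Bool) (out : List (String × List (Int × Int))) : Prop := out = get_edge_color_data_dict_py_alt desired achieved sort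
instance (desired : List (Int × Int)) (achieved : List (Int × Int)) (sort : Bool) (out : List (String × List (Int × Int))) : Decidable (Spec_get_edge_color_data_dict_py desired achieved sort out) := by unfold Spec_get_edge_color_data_dict_py; infer_instance

-- ===== CLAIM (what is proved, stated in full; the proofs are below) =====
def Claim_equal_get_edge_color_data_dict_py : Prop := ∀ (desired : List (Int × Int)) (achieved : List (Int × Int)) (sort : Bool), Dom_get_edge_color_data_dict_py desired achieved sort → Spec_get_edge_color_data_dict_py desired achieved sort (get_edge_color_data_dict_py desired achieved sort)

-- ===== LEMMAS AND PROOFS =====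

-- PySem.Set.add in terms of list membership
theorem add_eq_of_mem (s : List (Int × Int)) (x : Int × Int) (h : x ∈ s) :
    PySem.Set.add s x = s := by
  simp [PySem.Set.add, PySem.Set.contains, h]

theorem add_eq_append (s : List (Int × Int)) (x : Int × Int) (h : x ∉ s) :
    PySem.Set.add s x = s ++ [x] := by
  simp [PySem.Set.add, PySem.Set.contains, h]

-- folding Set.add over elements already present is a no-op
theorem foldl_add_absorb : ∀ (l s : List (Int × Int)), (∀ x ∈ l, x ∈ s) →
    l.foldl PySem.Set.add s = s := by
  intro l
  induction l with
  | nil => intro s _; rfl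
  | cons x t ih =>
    intro s h
    simp only [List.foldl_cons, add_eq_of_mem s x (h x (by simp))]
    exact ih s (fun y hy => h y (by simp [hy]))

-- filtering commutes with the Set.add fold (first-occurrence dedup)
theorem filter_foldl_add (p : Int × Int → Bool) : ∀ (l s : List (Int × Int)),
    (l.foldl PySem.Set.add s).filter p = (l.filter p).foldl PySem.Set.add (s.filter p) := by
  intro l
  induction l with
  | nil => intro s; rfl
  | cons x t ih =>
    intro s
    simp only [List.foldl_cons, List.filter_cons]
    by_cases hm : x ∈ s
    · rw [add_eq_of_mem s x hm]
      by_cases hp : p x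
      · have hmf : x ∈ s.filter p := List.mem_filter.mpr ⟨hm, hp⟩
        simp only [hp, if_pos, List.foldl_cons, ih, add_eq_of_mem _ x hmf]
      · simp only [hp, Bool.false_eq_true, if_neg, not_false_iff, ih]
    · rw [add_eq_append s x hm]
      by_cases hp : p x
      · have : (s ++ [x]).filter p = s.filter p ++ [x] := by
          simp [List.filter_append, hp]
        have hmf : x ∉ s.filter p := fun hc => hm (List.mem_filter.mp hc).1
        simp only [hp, if_pos, List.foldl_cons, ih, this, add_eq_append _ x hmf]
      · have : (s ++ [x]).filter p = s.filter p := by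
          simp [List.filter_append, hp]
        simp only [hp, Bool.false_eq_true, if_neg, not_false_iff, ih, this]

-- membership in the fold result
theorem mem_foldl_add : ∀ (l s : List (Int × Int)) (x : Int × Int),
    x ∈ l.foldl PySem.Set.add s ↔ x ∈ s ∨ x ∈ l := by
  intro l
  induction l with
  | nil => intro s x; simp
  | cons y t ih =>
    intro s x
    simp only [List.foldl_cons]
    by_cases hm : y ∈ s
    · rw [add_eq_of_mem s y hm, ih]
      constructor
      · rintro (h | h) <;> simp [h]
      · rintro (h | h)
        · exact Or.inl h
        · rcases List.mem_cons.mp h with rfl | h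
          · exact Or.inl hm
          · exact Or.inr h
    · rw [add_eq_append s y hm, ih]
      simp only [List.mem_append, List.mem_cons]
      tauto

-- A's fold characterised: each colour is the Set.add-fold of a filter of the scanned list
theorem foldA_char (d a : List (Int × Int)) : ∀ (l g b r : List (Int × Int)),
    l.foldl (stepA d a) (g, b, r) =
      ((l.filter (fun e => decide (e ∈ d ∧ e ∈ a))).foldl PySem.Set.add g,
       (l.filter (fun e => decide (e ∉ d ∧ e ∈ a))).foldl PySem.Set.add b,
       (l.filter (fun e => decide (e ∈ d ∧ e ∉ a))).foldl PySem.Set.add r) := by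
  intro l
  induction l with
  | nil => intro g b r; rfl
  | cons ed t ih =>
    intro g b r
    simp only [List.foldl_cons, List.filter_cons]
    by_cases hd : ed ∈ d <;> by_cases ha : ed ∈ a
    · have hA : stepA d a (g, b, r) ed = (PySem.Set.add g ed, b, r) := by
        by_cases hg : ed ∈ g
        · simp [stepA, hd, ha, hg]
        · simp [stepA, hd, ha, hg]
      simp [hA, hd, ha, ih]
    · have hA : stepA d a (g, b, r) ed = (g, b, PySem.Set.add r ed) := by
        by_cases hr : ed ∈ r
        · simp [stepA, hd, ha, hr]
        · simp [stepA, hd, ha, hr]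
      simp [hA, hd, ha, ih]
    · have hA : stepA d a (g, b, r) ed = (g, PySem.Set.add b ed, r) := by
        by_cases hb : ed ∈ b
        · simp [stepA, hd, ha, hb]
        · simp [stepA, hd, ha, hb]
      simp [hA, hd, ha, ih]
    · have hA : stepA d a (g, b, r) ed = (g, b, r) := by
        simp [stepA, hd, ha]
      simp [hA, hd, ha, ih]

-- Set.contains on an ofList is list membership
theorem contains_ofList (a : List (Int × Int)) (x : Int × Int) :
    PySem.Set.contains (PySem.Set.ofList a) x = decide (x ∈ a) := by
  by_cases h : x ∈ a <;> simp [PySem.Set.contains, PySem.Set.mem_ofList, h]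

-- dedup is the Set.add fold
theorem dedup_eq_fold (l : List (Int × Int)) :
    PySem.List.dedup l = l.foldl PySem.Set.add [] := by
  rw [PySem.List.dedup_eq_ofList, PySem.Set.ofList_eq_foldl]

theorem greenA_eq (d a : List (Int × Int)) :
    ((d ++ a).filter (fun e => decide (e ∈ d ∧ e ∈ a))).foldl PySem.Set.add [] =
      (PySem.List.dedup d).filter (fun ed => PySem.Set.contains (PySem.Set.ofList a) ed) := by
  rw [List.filter_append, List.foldl_append]
  rw [foldl_add_absorb (a.filter _) _ (by
    intro x hx
    have hxa := List.mem_filter.mp hx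
    have hp := of_decide_eq_true hxa.2
    rw [mem_foldl_add]
    exact Or.inr (List.mem_filter.mpr ⟨hp.1, by simpa using hp⟩))]
  rw [List.filter_congr (l := d) (q := fun e => decide (e ∈ a))
    (by intro x hx; simp [hx])]
  rw [dedup_eq_fold, filter_foldl_add, List.filter_nil]
  exact congrArg (List.foldl PySem.Set.add [])
    (List.filter_congr (fun x _ => by rw [contains_ofList])).symm

theorem redA_eq (d a : List (Int × Int)) :
    ((d ++ a).filter (fun e => decide (e ∈ d ∧ e ∉ a))).foldl PySem.Set.add [] =
      (PySem.List.dedup d).filter (fun ed => ! PySem.Set.contains (PySem.Set.ofList a) ed) := by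
  rw [List.filter_append]
  have h2 : a.filter (fun e => decide (e ∈ d ∧ e ∉ a)) = [] :=
    List.filter_eq_nil_iff.mpr (by intro x hx; simp [hx])
  rw [h2, List.append_nil]
  rw [List.filter_congr (l := d) (q := fun e => ! decide (e ∈ a))
    (by intro x hx; simp [hx])]
  rw [dedup_eq_fold, filter_foldl_add, List.filter_nil]
  exact congrArg (List.foldl PySem.Set.add [])
    (List.filter_congr (fun x _ => by rw [contains_ofList])).symm

theorem blueA_eq (d a : List (Int × Int)) :
    ((d ++ a).filter (fun e => decide (e ∉ d ∧ e ∈ a))).foldl PySem.Set.add [] =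
      (PySem.List.dedup a).filter (fun ed => ! PySem.Set.contains (PySem.Set.ofList d) ed) := by
  rw [List.filter_append]
  have h2 : d.filter (fun e => decide (e ∉ d ∧ e ∈ a)) = [] :=
    List.filter_eq_nil_iff.mpr (by intro x hx; simp [hx])
  rw [h2, List.nil_append]
  rw [List.filter_congr (l := a) (q := fun e => ! decide (e ∈ d))
    (by intro x hx; simp [hx])]
  rw [dedup_eq_fold, filter_foldl_add, List.filter_nil]
  exact congrArg (List.foldl PySem.Set.add [])
    (List.filter_congr (fun x _ => by rw [contains_ofList])).symm

-- ===== VERDICT (by name: the statement is the Claim_ definition above) =====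
theorem get_edge_color_data_dict_py_spec : Claim_equal_get_edge_color_data_dict_py := by
  intro desired achieved sort _
  unfold Spec_get_edge_color_data_dict_py get_edge_color_data_dict_py get_edge_color_data_dict_py_alt
  dsimp only
  rw [foldA_char desired achieved, greenA_eq, redA_eq, blueA_eq]
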